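-- pv_equiv track=rewrite | github.com/pypi-data/pypi-mirror-385 | packages/ncbi-tree/ncbi_tree-1.0.0.tar.gz/ncbi_tree-1.0.0/ncbi_tree/core.py | analyze_depth_distribution
-- ===== SOURCE A (Python) =====
-- from collections import defaultdict
-- from typing import Dict, List, Tuple
--
-- def analyze_depth_distribution(taxonomy_id: str, tree: Dict[str, List[str]], rank_map: Dict[str, str], depth: int = 0) -> Dict[int, Dict[str, int]]:
-- 	"""Analyze rank distribution by depth"""
-- 	depth_ranks: Dict[int, Dict[str, int]] = defaultdict(lambda: defaultdict(int))
-- 	def traverse(node_id: str, current_depth: int):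
-- 		rank = rank_map.get(node_id, "no rank")
-- 		depth_ranks[current_depth][rank] += 1
-- 		for child in tree.get(node_id, []):
-- 			traverse(child, current_depth + 1)
-- 	traverse(taxonomy_id, depth)
-- 	return depth_ranks
-- ===== SOURCE B (Python) =====
-- def _count_level(rank_map, level):
--     counts = {}
--     for node in level:
--         rank = rank_map.get(node, "no rank")
--         counts[rank] = counts.get(rank, 0) + 1
--     return counts
--
--
-- def analyze_depth_distribution(taxonomy_id, tree, rank_map, depth=0):
--     """Two staged passes: first list the BFS levels, then count ranks per level."""
--     levels = []
--     frontier = [taxonomy_id]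
--     while frontier:
--         levels.append(frontier)
--         frontier = [child for node in frontier for child in tree.get(node, [])]
--     return {d: _count_level(rank_map, level) for d, level in enumerate(levels, depth)}
-- ===== Notes on version B (the rewrite author's own statement) =====
-- stated objective: alternative
-- what changed: A's recursive depth-first traversal, which updates the nested counter dict once per visited node, is replaced by two staged passes: an iterative breadth-first loop that only collects the list of levels, followed by a dict comprehension that counts the ranks of each collected level into its own fresh counter.
import Mathlib
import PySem

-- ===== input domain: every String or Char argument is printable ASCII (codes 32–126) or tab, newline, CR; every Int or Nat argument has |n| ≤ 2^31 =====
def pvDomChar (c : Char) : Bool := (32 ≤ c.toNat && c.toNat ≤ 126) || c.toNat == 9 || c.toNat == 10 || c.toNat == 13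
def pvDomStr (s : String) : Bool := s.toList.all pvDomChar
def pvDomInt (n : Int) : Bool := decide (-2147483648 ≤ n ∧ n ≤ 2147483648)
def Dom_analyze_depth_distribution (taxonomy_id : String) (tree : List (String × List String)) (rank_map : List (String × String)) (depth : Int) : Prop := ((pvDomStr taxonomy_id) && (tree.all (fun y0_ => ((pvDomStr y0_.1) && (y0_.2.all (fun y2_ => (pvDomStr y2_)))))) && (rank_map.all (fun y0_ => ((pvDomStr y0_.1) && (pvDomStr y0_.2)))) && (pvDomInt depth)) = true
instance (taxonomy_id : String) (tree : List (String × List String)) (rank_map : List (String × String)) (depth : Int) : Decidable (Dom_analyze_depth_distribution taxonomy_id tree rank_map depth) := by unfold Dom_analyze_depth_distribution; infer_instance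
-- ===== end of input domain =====

-- B replaces A's recursive depth-first counting by two staged passes — collect the BFS levels,
-- then count ranks per collected level (objective: alternative decomposition, no recursion).


-- ===== PORT A =====
-- A's primitive lookups: tree.get(node, []) and rank_map.get(node, "no rank")
def pvChildren (tree : List (String × List String)) (node : String) : List String :=
  PySem.Dict.getD (PySem.Dict.mk tree) node []

def pvRank (rank_map : List (String × String)) (node : String) : String :=
  PySem.Dict.getD (PySem.Dict.mk rank_map) node "no rank"

-- depth_ranks[current_depth][rank] += 1  on defaultdict(lambda: defaultdict(int))
def pvBump (dd : PySem.Dict Int (PySem.Dict String Int)) (d : Int) (r : String) :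
    PySem.Dict Int (PySem.Dict String Int) :=
  let inner := PySem.Dict.getD dd d PySem.Dict.empty
  dd.insert d (inner.insert r (inner.getD r 0 + 1))

-- A's recursive `traverse` (fuel makes the recursion total; tree.length + 2 levels always
-- suffice whenever the Python returns, i.e. when no cycle is reachable: a repeating-free
-- root path visits distinct tree keys only)
def pvTravA (tree : List (String × List String)) (rank_map : List (String × String)) :
    Nat → String → Int → PySem.Dict Int (PySem.Dict String Int) → PySem.Dict Int (PySem.Dict String Int)
  | 0, _, _, dd => dd
  | f + 1, node, d, dd =>
      let dd1 := pvBump dd d (pvRank rank_map node)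
      (pvChildren tree node).foldl (fun a c => pvTravA tree rank_map f c (d + 1) a) dd1

def analyze_depth_distribution (taxonomy_id : String) (tree : List (String × List String)) (rank_map : List (String × String)) (depth : Int) : List (Int × List (String × Int)) :=
  (pvTravA tree rank_map (tree.length + 2) taxonomy_id depth PySem.Dict.empty).items.map
    (fun p => (p.1, p.2.items))

-- ===== PORT B =====
-- _count_level: a fresh plain-dict counter for one level
def pvCountLevel (rank_map : List (String × String)) (level : List String) : PySem.Dict String Int :=
  level.foldl (fun counts node =>
    let rank := PySem.Dict.getD (PySem.Dict.mk rank_map) node "no rank"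
    counts.insert rank (counts.getD rank 0 + 1)) PySem.Dict.empty

-- the `while frontier:` loop collecting the list of BFS levels (same fuel bound as port A)
def pvLevels (tree : List (String × List String)) : Nat → List String → List (List String)
  | 0, _ => []
  | f + 1, frontier =>
      if frontier.isEmpty then []
      else frontier ::
        pvLevels tree f (frontier.flatMap (fun node => PySem.Dict.getD (PySem.Dict.mk tree) node []))

-- the dict comprehension over enumerate(levels, depth)
def analyze_depth_distribution_alt (taxonomy_id : String) (tree : List (String × List String)) (rank_map : List (String × String)) (depth : Int) : List (Int × List (String × Int)) :=
  ((PySem.List.enumerate (pvLevels tree (tree.length + 2) [taxonomy_id]) depth).foldl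
      (fun result p => result.insert p.1 (pvCountLevel rank_map p.2)) PySem.Dict.empty).items.map
    (fun p => (p.1, p.2.items))

-- ===== PRECONDITION & SPEC =====
-- reachable-set closure of `tree` (standard graph closure, not the ports' traversals)
def pvReachStep (tree : List (String × List String)) (s : List String) : List String :=
  PySem.List.dedup (s ++ s.flatMap (pvChildren tree))

def pvReach (tree : List (String × List String)) (start : List String) : List String :=
  (pvReachStep tree)^[tree.length + (tree.flatMap (·.2)).length + 1] start

-- Pre_ excludes inputs on which a cycle of `tree` is reachable from taxonomy_id: there Python A
-- recurses forever (RecursionError), so A returns no value and nothing is claimed.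
def Pre_analyze_depth_distribution (taxonomy_id : String) (tree : List (String × List String)) (rank_map : List (String × String)) (depth : Int) : Prop :=
  ∀ v ∈ pvReach tree [taxonomy_id], v ∉ pvReach tree (pvChildren tree v)
instance (taxonomy_id : String) (tree : List (String × List String)) (rank_map : List (String × String)) (depth : Int) : Decidable (Pre_analyze_depth_distribution taxonomy_id tree rank_map depth) := by unfold Pre_analyze_depth_distribution; infer_instance

def pvWitness_analyze_depth_distribution : String × (List (String × List String)) × (List (String × String)) × Int :=
  ("1", [("1", ["2", "3"])], [("1", "root"), ("2", "species")], 0)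

def Spec_analyze_depth_distribution (taxonomy_id : String) (tree : List (String × List String)) (rank_map : List (String × String)) (depth : Int) (out : List (Int × List (String × Int))) : Prop := out = analyze_depth_distribution_alt taxonomy_id tree rank_map depth
instance (taxonomy_id : String) (tree : List (String × List String)) (rank_map : List (String × String)) (depth : Int) (out : List (Int × List (String × Int))) : Decidable (Spec_analyze_depth_distribution taxonomy_id tree rank_map depth out) := by unfold Spec_analyze_depth_distribution; infer_instance

-- ===== CLAIM (what is proved, stated in full; the proofs are below) =====
def Claim_equal_analyze_depth_distribution : Prop := ∀ (taxonomy_id : String) (tree : List (String × List String)) (rank_map : List (String × String)) (depth : Int), Dom_analyze_depth_distribution taxonomy_id tree rank_map depth → Pre_analyze_depth_distribution taxonomy_id tree rank_map depth → Spec_analyze_depth_distribution taxonomy_id tree rank_map depth (analyze_depth_distribution taxonomy_id tree rank_map depth)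

-- ===== LEMMAS AND PROOFS =====

-- proof-internal bridge: the level-by-level counting loop (A's DFS is shown equal to it,
-- and its items are shown to be B's enumerated comprehension)
def pvLevelCount (rank_map : List (String × String)) (level : List String) (c : PySem.Dict String Int) :
    PySem.Dict String Int :=
  level.foldl (fun c node =>
    let r := pvRank rank_map node
    c.insert r (c.getD r 0 + 1)) c

def pvLevelB (tree : List (String × List String)) (rank_map : List (String × String)) :
    Nat → List String → Int → PySem.Dict Int (PySem.Dict String Int) → PySem.Dict Int (PySem.Dict String Int)
  | 0, _, _, dd => dd
  | f + 1, level, d, dd =>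
      if level.isEmpty then dd
      else
        pvLevelB tree rank_map f (level.flatMap (pvChildren tree)) (d + 1)
          (dd.insert d (pvLevelCount rank_map level (PySem.Dict.getD dd d PySem.Dict.empty)))

-- A's fold over a list of same-depth nodes
def pvTravList (tree : List (String × List String)) (rank_map : List (String × String))
    (f : Nat) (nodes : List String) (d : Int) (dd : PySem.Dict Int (PySem.Dict String Int)) :
    PySem.Dict Int (PySem.Dict String Int) :=
  nodes.foldl (fun a c => pvTravA tree rank_map f c d a) dd

def pvBumps (rank_map : List (String × String)) (nodes : List String) (d : Int)
    (dd : PySem.Dict Int (PySem.Dict String Int)) : PySem.Dict Int (PySem.Dict String Int) :=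
  nodes.foldl (fun a n => pvBump a d (pvRank rank_map n)) dd

theorem pvTravList_zero (tree rank_map) (nodes : List String) (d dd) :
    pvTravList tree rank_map 0 nodes d dd = dd := by
  induction nodes with
  | nil => rfl
  | cons n ns ih => simp only [pvTravList, List.foldl_cons, pvTravA] at ih ⊢; exact ih

theorem pvTravList_append (tree rank_map f) (l1 l2 : List String) (d dd) :
    pvTravList tree rank_map f (l1 ++ l2) d dd
      = pvTravList tree rank_map f l2 d (pvTravList tree rank_map f l1 d dd) := by
  simp [pvTravList, List.foldl_append]

theorem pvBump_mem_keys {dd : PySem.Dict Int (PySem.Dict String Int)} {k d : Int} (r : String)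
    (h : k ∈ dd.keys) : k ∈ (pvBump dd d r).keys := by
  simp [pvBump, PySem.Dict.mem_keys_insert, h]

theorem pvBump_self_mem_keys (dd : PySem.Dict Int (PySem.Dict String Int)) (d : Int) (r : String) :
    d ∈ (pvBump dd d r).keys := by
  simp [pvBump, PySem.Dict.mem_keys_insert]

theorem pvTravA_mem_keys (tree rank_map) (f : Nat) (n : String) (d' : Int)
    {dd : PySem.Dict Int (PySem.Dict String Int)} {k : Int} (h : k ∈ dd.keys) :
    k ∈ (pvTravA tree rank_map f n d' dd).keys := by
  induction f generalizing n d' dd with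
  | zero => simpa [pvTravA] using h
  | succ f ih =>
      rw [pvTravA]
      have : ∀ (L : List String) (dd' : PySem.Dict Int (PySem.Dict String Int)), k ∈ dd'.keys →
          k ∈ (L.foldl (fun a c => pvTravA tree rank_map f c (d' + 1) a) dd').keys := by
        intro L
        induction L with
        | nil => intro dd' h'; simpa using h'
        | cons x xs ihL => intro dd' h'; exact ihL _ (ih x (d' + 1) (dd := dd') h')
      exact this _ _ (pvBump_mem_keys _ h)

-- inserts at two different keys commute when the first key is already present
theorem pvInsert_comm {κ ν : Type} [BEq κ] [LawfulBEq κ] (dd : PySem.Dict κ ν) (k k' : κ)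
    (v v' : ν) (hne : k ≠ k') (h : dd.contains k = true) :
    (dd.insert k' v').insert k v = (dd.insert k v).insert k' v' := by
  apply PySem.Dict.ext
  have hk' : (dd.insert k' v').contains k = true := by
    rw [PySem.Dict.contains_insert]; simp [h]
  by_cases hc : dd.contains k' = true
  · have hk : (dd.insert k v).contains k' = true := by
      rw [PySem.Dict.contains_insert]; simp [hc]
    rw [PySem.Dict.items_insert_of_contains _ v hk',
        PySem.Dict.items_insert_of_contains _ v' hc,
        PySem.Dict.items_insert_of_contains _ v' hk,
        PySem.Dict.items_insert_of_contains _ v h,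
        List.map_map, List.map_map]
    apply List.map_congr_left
    intro p _
    by_cases h1 : p.1 = k <;> by_cases h2 : p.1 = k' <;>
      simp [Function.comp, h1, h2, hne, Ne.symm hne]
  · have hcf : dd.contains k' = false := by simpa using hc
    have hk : (dd.insert k v).contains k' = false := by
      rw [PySem.Dict.contains_insert]; simp [hcf, Ne.symm hne]
    rw [PySem.Dict.items_insert_of_contains _ v hk',
        PySem.Dict.items_insert_of_not_contains _ v' hcf,
        PySem.Dict.items_insert_of_not_contains _ v' hk,
        PySem.Dict.items_insert_of_contains _ v h,
        List.map_append]
    simp [Ne.symm hne]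

-- two bumps at different depths commute once the moving depth is already a key
theorem pvBump_comm {dd : PySem.Dict Int (PySem.Dict String Int)} {d d' : Int}
    (r r' : String) (hne : d ≠ d') (h : d ∈ dd.keys) :
    pvBump (pvBump dd d' r') d r = pvBump (pvBump dd d r) d' r' := by
  have hg : (pvBump dd d' r').getD d PySem.Dict.empty = dd.getD d PySem.Dict.empty :=
    PySem.Dict.getD_insert_of_ne _ _ _ hne
  have hg' : (pvBump dd d r).getD d' PySem.Dict.empty = dd.getD d' PySem.Dict.empty :=
    PySem.Dict.getD_insert_of_ne _ _ _ (Ne.symm hne)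
  have hc : dd.contains d = true := by
    rw [PySem.Dict.contains_iff_mem_keys] at *; exact h
  show (pvBump dd d' r').insert d _ = (pvBump dd d r).insert d' _
  rw [hg, hg']
  exact pvInsert_comm _ d d' _ _ hne hc

-- a bump at an already-present shallower depth commutes past a whole deeper traversal
theorem pvBump_travA_comm (tree rank_map) (f : Nat) :
    (∀ (n : String) (d' d : Int) (dd : PySem.Dict Int (PySem.Dict String Int)) (r : String),
        d < d' → d ∈ dd.keys →
        pvBump (pvTravA tree rank_map f n d' dd) d r = pvTravA tree rank_map f n d' (pvBump dd d r)) ∧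
    (∀ (L : List String) (d' d : Int) (dd : PySem.Dict Int (PySem.Dict String Int)) (r : String),
        d < d' → d ∈ dd.keys →
        pvBump (pvTravList tree rank_map f L d' dd) d r = pvTravList tree rank_map f L d' (pvBump dd d r)) := by
  induction f with
  | zero =>
      constructor
      · intro n d' d dd r _ _; simp [pvTravA]
      · intro L d' d dd r _ _; simp [pvTravList_zero]
  | succ f ih =>
      have hA : ∀ (n : String) (d' d : Int) (dd : PySem.Dict Int (PySem.Dict String Int)) (r : String),
          d < d' → d ∈ dd.keys →
          pvBump (pvTravA tree rank_map (f + 1) n d' dd) d r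
            = pvTravA tree rank_map (f + 1) n d' (pvBump dd d r) := by
        intro n d' d dd r hlt hmem
        show pvBump (pvTravList tree rank_map f (pvChildren tree n) (d' + 1)
            (pvBump dd d' (pvRank rank_map n))) d r = _
        rw [ih.2 _ _ _ _ _ (by omega) (pvBump_mem_keys _ hmem),
            pvBump_comm _ _ (by omega) hmem]
        rfl
      refine ⟨hA, ?_⟩
      intro L
      induction L with
      | nil => intro d' d dd r _ _; simp [pvTravList]
      | cons x xs ihL =>
          intro d' d dd r hlt hmem
          show pvBump (pvTravList tree rank_map (f + 1) xs d' (pvTravA tree rank_map (f + 1) x d' dd)) d r = _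
          rw [ihL _ _ _ _ hlt (pvTravA_mem_keys tree rank_map (f + 1) x d' hmem),
              hA _ _ _ _ _ hlt hmem]
          rfl

theorem pvBumps_travList_comm (tree rank_map) (f : Nat) (ms : List String) (L : List String)
    (d' d : Int) (dd : PySem.Dict Int (PySem.Dict String Int)) (hlt : d < d') (h : d ∈ dd.keys) :
    pvBumps rank_map ms d (pvTravList tree rank_map f L d' dd)
      = pvTravList tree rank_map f L d' (pvBumps rank_map ms d dd) := by
  induction ms generalizing dd with
  | nil => rfl
  | cons m ms ih =>
      show pvBumps rank_map ms d (pvBump (pvTravList tree rank_map f L d' dd) d (pvRank rank_map m)) = _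
      rw [(pvBump_travA_comm tree rank_map f).2 _ _ _ _ _ hlt h,
          ih _ (pvBump_self_mem_keys dd d _)]
      rfl

-- interchange: one DFS layer over a level = all its bumps, then the DFS of the children
theorem pvTravList_interchange (tree rank_map) (ns : List String) (f : Nat) (d : Int)
    (dd : PySem.Dict Int (PySem.Dict String Int)) :
    pvTravList tree rank_map (f + 1) ns d dd
      = pvTravList tree rank_map f (ns.flatMap (pvChildren tree)) (d + 1) (pvBumps rank_map ns d dd) := by
  induction ns generalizing dd with
  | nil => rfl
  | cons n ns ih =>
      show pvTravList tree rank_map (f + 1) ns d (pvTravA tree rank_map (f + 1) n d dd) = _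
      have hstep : pvTravA tree rank_map (f + 1) n d dd
          = pvTravList tree rank_map f (pvChildren tree n) (d + 1) (pvBump dd d (pvRank rank_map n)) := rfl
      rw [hstep, ih _,
          pvBumps_travList_comm tree rank_map f ns _ _ _ _ (by omega) (pvBump_self_mem_keys dd d _),
          ← pvTravList_append]
      rfl

theorem pvBumps_insert (rank_map) (ns : List String) (d : Int)
    (dd : PySem.Dict Int (PySem.Dict String Int)) (c : PySem.Dict String Int) :
    pvBumps rank_map ns d (dd.insert d c) = dd.insert d (pvLevelCount rank_map ns c) := by
  induction ns generalizing c with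
  | nil => rfl
  | cons n ns ih =>
      show pvBumps rank_map ns d (pvBump (dd.insert d c) d (pvRank rank_map n)) = _
      have h1 : pvBump (dd.insert d c) d (pvRank rank_map n)
          = dd.insert d (c.insert (pvRank rank_map n) (c.getD (pvRank rank_map n) 0 + 1)) := by
        show (dd.insert d c).insert d _ = _
        rw [PySem.Dict.getD_insert_self, PySem.Dict.insert_insert_self]
      rw [h1, ih]
      rfl

-- A's DFS fold equals the level loop, levels below d untouched
theorem pvMain (tree rank_map) (f : Nat) (nodes : List String) (d : Int)
    (dd : PySem.Dict Int (PySem.Dict String Int)) (hinv : ∀ k ∈ dd.keys, k < d) :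
    pvTravList tree rank_map f nodes d dd = pvLevelB tree rank_map f nodes d dd := by
  induction f generalizing nodes d dd with
  | zero => simp [pvTravList_zero, pvLevelB]
  | succ f ih =>
      cases nodes with
      | nil => simp [pvTravList, pvLevelB]
      | cons n ns =>
          have hd : dd.contains d = false := by
            by_contra hc
            have hm : d ∈ dd.keys := (PySem.Dict.contains_iff_mem_keys dd d).1 (by simpa using hc)
            have := hinv d hm; omega
          have he : dd.getD d PySem.Dict.empty = PySem.Dict.empty :=
            PySem.Dict.getD_of_not_contains dd _ hd
          have h2 : pvBumps rank_map (n :: ns) d dd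
              = dd.insert d (pvLevelCount rank_map (n :: ns) (dd.getD d PySem.Dict.empty)) := by
            show pvBumps rank_map ns d (pvBump dd d (pvRank rank_map n)) = _
            have hb : pvBump dd d (pvRank rank_map n)
                = dd.insert d ((PySem.Dict.empty : PySem.Dict String Int).insert (pvRank rank_map n)
                    ((PySem.Dict.empty : PySem.Dict String Int).getD (pvRank rank_map n) 0 + 1)) := by
              show dd.insert d _ = _
              rw [he]
            rw [hb, pvBumps_insert, he]
            rfl
          have h3 : pvLevelB tree rank_map (f + 1) (n :: ns) d dd
              = pvLevelB tree rank_map f ((n :: ns).flatMap (pvChildren tree)) (d + 1)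
                  (dd.insert d (pvLevelCount rank_map (n :: ns) (dd.getD d PySem.Dict.empty))) := by
            rw [pvLevelB]
            rfl
          rw [pvTravList_interchange, h2, h3]
          refine ih _ _ _ ?_
          intro k hk
          rcases (PySem.Dict.mem_keys_insert dd d k _).1 hk with rfl | hm
          · omega
          · have := hinv k hm; omega

-- the level loop's items are exactly B's per-level counters, enumerated from d
theorem pvLevelB_items (tree rank_map) (f : Nat) (frontier : List String) (d : Int)
    (dd : PySem.Dict Int (PySem.Dict String Int)) (hinv : ∀ k ∈ dd.keys, k < d) :
    (pvLevelB tree rank_map f frontier d dd).items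
      = dd.items ++ (PySem.List.enumerate (pvLevels tree f frontier) d).map
          (fun p => (p.1, pvCountLevel rank_map p.2)) := by
  induction f generalizing frontier d dd with
  | zero => simp [pvLevelB, pvLevels, PySem.List.enumerate_nil]
  | succ f ih =>
      by_cases hfe : frontier.isEmpty
      · simp [pvLevelB, pvLevels, hfe, PySem.List.enumerate_nil]
      · have hd : dd.contains d = false := by
          by_contra hc
          have hm : d ∈ dd.keys := (PySem.Dict.contains_iff_mem_keys dd d).1 (by simpa using hc)
          have := hinv d hm; omega
        have he : dd.getD d PySem.Dict.empty = PySem.Dict.empty :=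
          PySem.Dict.getD_of_not_contains dd _ hd
        have hstep : pvLevelB tree rank_map (f + 1) frontier d dd
            = pvLevelB tree rank_map f (frontier.flatMap (pvChildren tree)) (d + 1)
                (dd.insert d (pvLevelCount rank_map frontier PySem.Dict.empty)) := by
          rw [pvLevelB, if_neg hfe, he]
        have hlev : pvLevels tree (f + 1) frontier
            = frontier :: pvLevels tree f (frontier.flatMap (pvChildren tree)) := by
          rw [pvLevels, if_neg hfe]
          rfl
        rw [hstep, ih _ _ _ (by
              intro k hk
              rcases (PySem.Dict.mem_keys_insert dd d k _).1 hk with rfl | hm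
              · omega
              · have := hinv k hm; omega),
            PySem.Dict.items_insert_of_not_contains _ _ hd, hlev,
            PySem.List.enumerate_cons]
        simp [pvCountLevel, pvLevelCount, pvRank]

-- evaluate B's comprehension: the inserted keys are fresh and distinct
theorem pvFoldInsertItems (rank_map : List (String × String)) (l : List (Int × List String))
    (dd : PySem.Dict Int (PySem.Dict String Int)) (hfresh : ∀ p ∈ l, dd.contains p.1 = false)
    (hnd : (l.map (fun p => p.1)).Nodup) :
    (l.foldl (fun result p => result.insert p.1 (pvCountLevel rank_map p.2)) dd).items
      = dd.items ++ l.map (fun p => (p.1, pvCountLevel rank_map p.2)) := by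
  induction l generalizing dd with
  | nil => simp
  | cons p ps ih =>
      simp only [List.foldl_cons, List.map_cons]
      rw [ih _ (by
            intro q hq
            rw [PySem.Dict.contains_insert]
            have h1 : (q.1 == p.1) = false := by
              simp only [List.map_cons, List.nodup_cons, List.mem_map] at hnd
              exact beq_eq_false_iff_ne.mpr fun h => hnd.1 ⟨q, hq, h⟩
            rw [h1, hfresh q (List.mem_cons_of_mem _ hq)]
            rfl)
          (by simp only [List.map_cons, List.nodup_cons] at hnd; exact hnd.2),
        PySem.Dict.items_insert_of_not_contains _ _ (hfresh p (List.mem_cons_self))]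
      simp

theorem pvAlt_items (taxonomy_id : String) (tree : List (String × List String))
    (rank_map : List (String × String)) (depth : Int) :
    analyze_depth_distribution_alt taxonomy_id tree rank_map depth
      = ((PySem.List.enumerate (pvLevels tree (tree.length + 2) [taxonomy_id]) depth).map
          (fun p => (p.1, pvCountLevel rank_map p.2))).map (fun p => (p.1, p.2.items)) := by
  unfold analyze_depth_distribution_alt
  rw [pvFoldInsertItems rank_map _ _ (by intro a _; simp)
      (by
        have hp := PySem.List.pairwise_lt_enumerate
          (xs := pvLevels tree (tree.length + 2) [taxonomy_id]) (s := depth)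
        exact (List.pairwise_map.mpr (hp.imp fun h => ne_of_lt h))),
    (by rfl : (PySem.Dict.empty : PySem.Dict Int (PySem.Dict String Int)).items = [])]
  simp

-- ===== VERDICT (by name: the statement is the Claim_ definition above) =====
theorem analyze_depth_distribution_spec : Claim_equal_analyze_depth_distribution := by
  intro taxonomy_id tree rank_map depth _ _
  show _ = analyze_depth_distribution_alt taxonomy_id tree rank_map depth
  unfold analyze_depth_distribution
  rw [show pvTravA tree rank_map (tree.length + 2) taxonomy_id depth PySem.Dict.empty
        = pvTravList tree rank_map (tree.length + 2) [taxonomy_id] depth PySem.Dict.empty from rfl,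
      pvMain tree rank_map (tree.length + 2) [taxonomy_id] depth PySem.Dict.empty
        (by simp [PySem.Dict.keys_empty]),
      pvLevelB_items tree rank_map (tree.length + 2) [taxonomy_id] depth PySem.Dict.empty
        (by simp [PySem.Dict.keys_empty]),
      pvAlt_items]
  rfl
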